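-- pv_equiv track=rewrite | github.com/koonwen/DSA | Codility/HudsonRiverTrading/bitwiseAnd.py | solution
-- ===== SOURCE A (Python) =====
-- from functools import reduce
-- from itertools import chain, combinations
--
-- def powerset(iterable):
--     "powerset([1,2,3]) --> () (1,) (2,) (3,) (1,2) (1,3) (2,3) (1,2,3)"
--     s = list(iterable)
--     return chain.from_iterable(combinations(s, r) for r in range(len(s)+1))
--
-- def solution(A):
--     subsets = powerset(A)
--     max_so_far = 0
--     for subset in subsets:
--         res = reduce(lambda x, y: x & y, subset, ~0)
--         if res > 0:
--             max_so_far = max(max_so_far, len(subset))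
--     return max_so_far
-- ===== SOURCE B (Python) =====
-- def solution(A):
--     best = 0
--     for b in range(32):
--         cnt = 0
--         has_nonneg = False
--         for x in A:
--             if (x >> b) & 1:
--                 cnt += 1
--                 if x >= 0:
--                     has_nonneg = True
--         if has_nonneg and cnt > best:
--             best = cnt
--     return best
-- ===== Notes on version B (the rewrite author's own statement) =====
-- stated objective: faster
-- what changed: Replaced the exponential scan of all 2^n subsets (reducing & over each) by a single per-bit counting pass: for each of the 32 candidate bit positions count the elements with that bit set and track whether one of them is nonnegative; the answer is the best such count.
import Mathlib
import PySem

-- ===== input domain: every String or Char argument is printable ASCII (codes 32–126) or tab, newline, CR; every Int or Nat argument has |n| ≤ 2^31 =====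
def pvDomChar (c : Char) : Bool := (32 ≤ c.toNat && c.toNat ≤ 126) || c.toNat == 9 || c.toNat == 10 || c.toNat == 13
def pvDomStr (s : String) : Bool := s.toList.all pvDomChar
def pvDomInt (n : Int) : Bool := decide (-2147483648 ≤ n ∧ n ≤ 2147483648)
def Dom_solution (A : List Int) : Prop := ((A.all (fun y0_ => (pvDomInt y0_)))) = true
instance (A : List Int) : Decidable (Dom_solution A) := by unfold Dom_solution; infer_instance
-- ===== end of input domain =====

-- B replaces A's exponential scan of all subsets by one counting pass per bit position (asymptotically faster).

-- ===== PORT A =====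
-- itertools.combinations(s, r): all length-r subsequences, lexicographic by index
def pyCombos : Nat → List Int → List (List Int)
  | 0, _ => [[]]
  | _ + 1, [] => []
  | r + 1, x :: xs => (pyCombos r xs).map (fun t => x :: t) ++ pyCombos (r + 1) xs

-- powerset: chain of combinations(s, r) for r in range(len(s)+1)
def pyPowerset (s : List Int) : List (List Int) :=
  (List.range (s.length + 1)).flatMap (fun r => pyCombos r s)

def solution (A : List Int) : Int :=
  (pyPowerset A).foldl
    (fun maxSoFar subset =>
      let res := subset.foldl (fun x y => PySem.Int.band x y) (Int.not 0)
      if 0 < res then max maxSoFar (subset.length : Int) else maxSoFar) 0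

-- ===== PORT B =====
def solution_alt (A : List Int) : Int :=
  (PySem.List.pyRange 0 32 1).foldl
    (fun best b =>
      match A.foldl
        (fun (st : Int × Bool) (x : Int) =>
          if PySem.Int.band (x >>> b.toNat) 1 ≠ 0 then
            (st.1 + 1, if 0 ≤ x then true else st.2)
          else st)
        ((0 : Int), false) with
      | (cnt, hasNonneg) => if hasNonneg && decide (best < cnt) then cnt else best) 0

-- ===== PRECONDITION & SPEC =====
def Spec_solution (A : List Int) (out : Int) : Prop := out = solution_alt A
instance (A : List Int) (out : Int) : Decidable (Spec_solution A out) := by unfold Spec_solution; infer_instance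

-- ===== CLAIM (what is proved, stated in full; the proofs are below) =====
def Claim_equal_solution : Prop := ∀ (A : List Int), Dom_solution A → Spec_solution A (solution A)

-- ===== LEMMAS AND PROOFS =====

theorem pv_ofNat_eq (m : ℕ) : Int.ofNat m = (m : Int) := rfl

theorem pv_negSucc_lt (m : ℕ) : Int.negSucc m < 0 := by
  rw [Int.negSucc_eq]; omega

theorem pv_zero_ldiff (n : ℕ) : Nat.ldiff 0 n = 0 :=
  Nat.eq_of_testBit_eq (by simp [Nat.testBit_ldiff])

theorem pv_ldiff_zero (m : ℕ) : Nat.ldiff m 0 = m :=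
  Nat.eq_of_testBit_eq (by simp [Nat.testBit_ldiff])

theorem pv_land_add_ldiff (m n : ℕ) : (m &&& n) + Nat.ldiff m n = m := by
  induction m using Nat.binaryRec generalizing n with
  | zero => simp [pv_zero_ldiff]
  | bit b m ih =>
    induction n using Nat.binaryRec with
    | zero => simp [pv_ldiff_zero]
    | bit c n _ =>
      have e1 : Nat.bit b m &&& Nat.bit c n = Nat.bit (b && c) (m &&& n) :=
        Nat.land_bit b m c n
      have e2 : (Nat.bit b m).ldiff (Nat.bit c n) = Nat.bit (b && !c) (m.ldiff n) :=
        Nat.ldiff_bit b m c n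
      rw [e1, e2]
      have := ih n
      cases b <;> cases c <;> simp [Nat.bit] <;> omega

theorem pv_band_eq_land (a b : Int) : PySem.Int.band a b = Int.land a b := by
  rcases a with m | m <;> rcases b with n | n <;>
    simp only [PySem.Int.band, Int.land, pv_ofNat_eq]
  · simp
  · have h1 : ¬ (0 : Int) ≤ Int.negSucc n := by
      have := pv_negSucc_lt n; omega
    have h2 : (0 : Int) ≤ (m : Int) := Int.natCast_nonneg m
    have h3 : (-(Int.negSucc n) - 1).toNat = n := by
      rw [Int.negSucc_eq]; omega
    rw [if_pos h2, if_neg h1, h3, Int.toNat_natCast]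
    have h4 := pv_land_add_ldiff m n
    omega
  · have h1 : ¬ (0 : Int) ≤ Int.negSucc m := by
      have := pv_negSucc_lt m; omega
    have h2 : (0 : Int) ≤ (n : Int) := Int.natCast_nonneg n
    have h3 : (-(Int.negSucc m) - 1).toNat = m := by
      rw [Int.negSucc_eq]; omega
    rw [if_neg h1, if_pos h2, h3, Int.toNat_natCast]
    have h4 := pv_land_add_ldiff n m
    omega
  · have h1 : ¬ (0 : Int) ≤ Int.negSucc m := by
      have := pv_negSucc_lt m; omega
    have h2 : ¬ (0 : Int) ≤ Int.negSucc n := by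
      have := pv_negSucc_lt n; omega
    have h3 : (-(Int.negSucc m) - 1).toNat = m := by rw [Int.negSucc_eq]; omega
    have h4 : (-(Int.negSucc n) - 1).toNat = n := by rw [Int.negSucc_eq]; omega
    rw [if_neg h1, if_neg h2, h3, h4, Int.negSucc_eq]
    ring

theorem pv_band_testBit (a b : Int) (k : ℕ) :
    (PySem.Int.band a b).testBit k = (a.testBit k && b.testBit k) := by
  rw [pv_band_eq_land, Int.testBit_land]

theorem pv_neg_one_testBit (k : ℕ) : (-1 : Int).testBit k = true := by
  show (Int.negSucc 0).testBit k = true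
  simp [Int.testBit, Nat.zero_testBit]

theorem pv_band_neg (a b : Int) (ha : a < 0) (hb : b < 0) : PySem.Int.band a b < 0 := by
  rw [pv_band_eq_land]
  rcases a with m | m
  · exact absurd ha (by rw [pv_ofNat_eq]; have := Int.natCast_nonneg m; omega)
  rcases b with n | n
  · exact absurd hb (by rw [pv_ofNat_eq]; have := Int.natCast_nonneg n; omega)
  show Int.negSucc (m ||| n) < 0
  exact pv_negSucc_lt _

theorem pv_testBit_pos (x : Int) (k : ℕ) (hx : 0 ≤ x) (h : x.testBit k = true) : 0 < x := by
  rcases x with m | m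
  · rcases Nat.eq_zero_or_pos m with rfl | hm
    · simp [Int.testBit, Nat.zero_testBit] at h
    · rw [pv_ofNat_eq]; exact_mod_cast hm
  · exact absurd hx (by have := pv_negSucc_lt m; omega)

theorem pv_exists_testBit (x : Int) (hx : 0 < x) : ∃ k, x.testBit k = true := by
  rcases x with m | m
  · by_contra h
    push Not at h
    have hm : m = 0 := Nat.eq_of_testBit_eq (fun i => by
      have := h i
      simp only [Int.testBit] at this
      simp [this, Nat.zero_testBit])
    rw [hm, pv_ofNat_eq] at hx
    omega
  · exact absurd hx (by have := pv_negSucc_lt m; omega)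

theorem pv_testBit_lt_32 (x : Int) (k : ℕ) (h0 : 0 ≤ x) (h1 : x ≤ 2147483648)
    (h : x.testBit k = true) : k < 32 := by
  rcases x with m | m
  · by_contra hk
    push Not at hk
    have hm : m ≤ 2147483648 := by
      rw [pv_ofNat_eq] at h1; exact_mod_cast h1
    have hlt : m < 2 ^ k := by
      calc m < 2 ^ 32 := by omega
        _ ≤ 2 ^ k := Nat.pow_le_pow_right (by norm_num) hk
    simp only [Int.testBit] at h
    rw [Nat.testBit_eq_false_of_lt hlt] at h
    exact Bool.false_ne_true h
  · exact absurd h0 (by have := pv_negSucc_lt m; omega)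

theorem pv_bitset_iff (x : Int) (k : ℕ) :
    (PySem.Int.band (x >>> (k : Int)) 1 ≠ 0) ↔ x.testBit k = true := by
  rw [pv_band_eq_land, Int.shiftRight_natCast_right]
  rcases x with m | m
  · show Int.land (Int.ofNat (m >>> k)) (Int.ofNat 1) ≠ 0 ↔ _
    show (Int.ofNat ((m >>> k) &&& 1)) ≠ 0 ↔ _
    rw [pv_ofNat_eq, Nat.and_one_is_mod]
    simp only [Int.testBit]
    rw [Nat.testBit_eq_decide_div_mod_eq, Nat.shiftRight_eq_div_pow]
    constructor
    · intro hne
      have hz : m / 2 ^ k % 2 ≠ 0 := by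
        intro hz; rw [hz] at hne; exact hne rfl
      simp; omega
    · intro ht hz
      simp at ht
      have : m / 2 ^ k % 2 = 0 := by exact_mod_cast hz
      omega
  · show Int.land (Int.negSucc (m >>> k)) (Int.ofNat 1) ≠ 0 ↔ _
    show (Int.ofNat (Nat.ldiff 1 (m >>> k))) ≠ 0 ↔ _
    rw [pv_ofNat_eq]
    have hld := pv_land_add_ldiff 1 (m >>> k)
    have hland : 1 &&& (m >>> k) = (m >>> k) % 2 := by
      rw [Nat.land_comm, Nat.and_one_is_mod]
    rw [hland] at hld
    rw [Nat.shiftRight_eq_div_pow] at hld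
    simp only [Int.testBit]
    rw [Nat.testBit_eq_decide_div_mod_eq, Nat.shiftRight_eq_div_pow]
    have h2 : m / 2 ^ k % 2 = 0 ∨ m / 2 ^ k % 2 = 1 := by omega
    rcases h2 with h2 | h2
    · rw [h2] at hld
      have hl : Nat.ldiff 1 (m / 2 ^ k) = 1 := by omega
      simp [hl, h2]
    · rw [h2] at hld
      have hl : Nat.ldiff 1 (m / 2 ^ k) = 0 := by omega
      simp [hl, h2]

-- characterization of A's fold (max-update)
theorem pv_foldmax_max {α : Type} (q : α → Prop) [DecidablePred q] (v : α → Int)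
    (L : List α) (m : Int) :
    m ≤ L.foldl (fun acc s => if q s then max acc (v s) else acc) m ∧
    (L.foldl (fun acc s => if q s then max acc (v s) else acc) m = m ∨
      ∃ s ∈ L, q s ∧ L.foldl (fun acc s => if q s then max acc (v s) else acc) m = v s) ∧
    (∀ s ∈ L, q s → v s ≤ L.foldl (fun acc s => if q s then max acc (v s) else acc) m) := by
  induction L generalizing m with
  | nil => simp
  | cons x xs ih =>
    simp only [List.foldl_cons]
    by_cases hq : q x
    · simp only [if_pos hq]
      obtain ⟨h1, h2, h3⟩ := ih (max m (v x))
      refine ⟨le_trans (le_max_left _ _) h1, ?_, ?_⟩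
      · rcases h2 with h2 | ⟨s, hs, hqs, hr⟩
        · rcases max_choice m (v x) with hmax | hmax
          · exact Or.inl (by rw [h2, hmax])
          · exact Or.inr ⟨x, by simp, hq, by rw [h2, hmax]⟩
        · exact Or.inr ⟨s, by simp [hs], hqs, hr⟩
      · intro s hs hqs
        rcases List.mem_cons.mp hs with rfl | hs'
        · exact le_trans (le_max_right _ _) h1
        · exact h3 s hs' hqs
    · simp only [if_neg hq]
      obtain ⟨h1, h2, h3⟩ := ih m
      refine ⟨h1, ?_, ?_⟩
      · rcases h2 with h2 | ⟨s, hs, hqs, hr⟩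
        · exact Or.inl h2
        · exact Or.inr ⟨s, by simp [hs], hqs, hr⟩
      · intro s hs hqs
        rcases List.mem_cons.mp hs with rfl | hs'
        · exact absurd hqs hq
        · exact h3 s hs' hqs

-- characterization of B's fold (strict-replace update)
theorem pv_foldmax_strict {α : Type} (q : α → Bool) (v : α → Int)
    (L : List α) (m : Int) :
    m ≤ L.foldl (fun acc b => if q b && decide (acc < v b) then v b else acc) m ∧
    (L.foldl (fun acc b => if q b && decide (acc < v b) then v b else acc) m = m ∨
      ∃ b ∈ L, q b = true ∧ L.foldl (fun acc b => if q b && decide (acc < v b) then v b else acc) m = v b) ∧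
    (∀ b ∈ L, q b = true → v b ≤ L.foldl (fun acc b => if q b && decide (acc < v b) then v b else acc) m) := by
  induction L generalizing m with
  | nil => simp
  | cons x xs ih =>
    simp only [List.foldl_cons]
    by_cases hq : (q x && decide (m < v x)) = true
    · simp only [if_pos hq]
      rw [Bool.and_eq_true, decide_eq_true_eq] at hq
      obtain ⟨h1, h2, h3⟩ := ih (v x)
      refine ⟨le_trans (le_of_lt hq.2) h1, ?_, ?_⟩
      · rcases h2 with h2 | ⟨s, hs, hqs, hr⟩
        · exact Or.inr ⟨x, by simp, hq.1, h2⟩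
        · exact Or.inr ⟨s, by simp [hs], hqs, hr⟩
      · intro s hs hqs
        rcases List.mem_cons.mp hs with rfl | hs'
        · exact h1
        · exact h3 s hs' hqs
    · simp only [if_neg hq]
      obtain ⟨h1, h2, h3⟩ := ih m
      refine ⟨h1, ?_, ?_⟩
      · rcases h2 with h2 | ⟨s, hs, hqs, hr⟩
        · exact Or.inl h2
        · exact Or.inr ⟨s, by simp [hs], hqs, hr⟩
      · intro s hs hqs
        rcases List.mem_cons.mp hs with rfl | hs'
        · have hnlt : ¬ m < v s := by
            intro hlt
            exact hq (by rw [Bool.and_eq_true, decide_eq_true_eq]; exact ⟨hqs, hlt⟩)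
          exact le_trans (by omega) h1
        · exact h3 s hs' hqs

-- pyCombos r l enumerates exactly the length-r sublists of l
theorem pv_mem_combos (r : ℕ) (l s : List Int) :
    s ∈ pyCombos r l ↔ s.Sublist l ∧ s.length = r := by
  induction l generalizing r s with
  | nil =>
    cases r with
    | zero =>
      show s ∈ [[]] ↔ _
      rw [List.mem_singleton, List.sublist_nil]
      constructor
      · rintro rfl; simp
      · rintro ⟨rfl, _⟩; rfl
    | succ r =>
      show s ∈ ([] : List (List Int)) ↔ _
      rw [List.sublist_nil]
      simp only [List.not_mem_nil, false_iff]
      rintro ⟨rfl, hl⟩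
      simp at hl
  | cons x xs ih =>
    cases r with
    | zero =>
      show s ∈ [[]] ↔ _
      rw [List.mem_singleton]
      constructor
      · rintro rfl; simp
      · rintro ⟨_, hl⟩; exact List.eq_nil_of_length_eq_zero hl
    | succ r =>
      show s ∈ (pyCombos r xs).map (fun t => x :: t) ++ pyCombos (r + 1) xs ↔ _
      rw [List.mem_append, List.mem_map, List.sublist_cons_iff]
      constructor
      · rintro (⟨t, ht, rfl⟩ | h)
        · obtain ⟨hsub, hlen⟩ := (ih r t).mp ht
          exact ⟨Or.inr ⟨t, rfl, hsub⟩, by simp [hlen]⟩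
        · obtain ⟨hsub, hlen⟩ := (ih (r + 1) s).mp h
          exact ⟨Or.inl hsub, hlen⟩
      · rintro ⟨h | ⟨t, rfl, hsub⟩, hlen⟩
        · exact Or.inr ((ih (r + 1) s).mpr ⟨h, hlen⟩)
        · exact Or.inl ⟨t, (ih r t).mpr ⟨hsub, by simpa using hlen⟩, rfl⟩

theorem pv_mem_powerset (A s : List Int) : s ∈ pyPowerset A ↔ s.Sublist A := by
  simp only [pyPowerset, List.mem_flatMap, List.mem_range, pv_mem_combos]
  constructor
  · rintro ⟨r, _, h, _⟩; exact h
  · intro h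
    exact ⟨s.length, by have := h.length_le; omega, h, rfl⟩

-- bits and sign of the reduce in A
theorem pv_foldl_band_testBit (s : List Int) (init : Int) (k : ℕ) :
    (s.foldl (fun x y => PySem.Int.band x y) init).testBit k =
      (init.testBit k && s.all (fun x => x.testBit k)) := by
  induction s generalizing init with
  | nil => simp
  | cons x xs ih =>
    simp [List.foldl_cons, ih, pv_band_testBit, Bool.and_assoc]

theorem pv_foldl_band_nonneg (s : List Int) (init : Int) (h : 0 ≤ init) :
    0 ≤ s.foldl (fun x y => PySem.Int.band x y) init := by
  induction s generalizing init with
  | nil => simpa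
  | cons x xs ih =>
    exact ih _ (PySem.Int.band_nonneg_of_nonneg_left x h)

theorem pv_foldl_band_neg (s : List Int) (init : Int) (h : init < 0)
    (hall : ∀ x ∈ s, x < 0) :
    s.foldl (fun x y => PySem.Int.band x y) init < 0 := by
  induction s generalizing init with
  | nil => simpa
  | cons x xs ih =>
    exact ih _ (pv_band_neg init x h (hall x (by simp))) (fun y hy => hall y (by simp [hy]))

theorem pv_foldl_band_nonneg_mem (s : List Int) (x : Int) (hx : x ∈ s) (h0 : 0 ≤ x) :
    ∀ init, 0 ≤ s.foldl (fun x y => PySem.Int.band x y) init := by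
  induction s with
  | nil => simp at hx
  | cons y ys ih =>
    intro init
    rcases List.mem_cons.mp hx with rfl | hx'
    · rw [List.foldl_cons]
      exact pv_foldl_band_nonneg ys _
        (by rw [PySem.Int.band_comm]; exact PySem.Int.band_nonneg_of_nonneg_left init h0)
    · exact ih hx' _

theorem pv_not_zero : Int.not 0 = -1 := by decide

-- the inner loop of B computes (count of bit-k elements, whether one of them is nonnegative)
theorem pv_innerB (k : ℕ) (A : List Int) (c : Int) (h : Bool) :
    A.foldl
      (fun (st : Int × Bool) (x : Int) =>
        if PySem.Int.band (x >>> (k : Int)) 1 ≠ 0 then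
          (st.1 + 1, if 0 ≤ x then true else st.2)
        else st) (c, h)
    = (c + ((A.filter (fun x => x.testBit k)).length : Int),
       h || A.any (fun x => x.testBit k && decide (0 ≤ x))) := by
  induction A generalizing c h with
  | nil => simp
  | cons x xs ih =>
    by_cases hx : x.testBit k = true
    · rw [List.foldl_cons, if_pos ((pv_bitset_iff x k).mpr hx)]
      rw [ih]
      by_cases hnn : (0 : Int) ≤ x
      · simp [hx, hnn]
        omega
      · simp [hx, hnn]
        omega
    · rw [List.foldl_cons, if_neg (fun hc => hx ((pv_bitset_iff x k).mp hc))]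
      rw [ih]
      simp at hx
      simp [hx]

def pv_vB (A : List Int) (b : Int) : Int := ((A.filter (fun x => x.testBit b.toNat)).length : Int)

def pv_qB (A : List Int) (b : Int) : Bool := A.any (fun x => x.testBit b.toNat && decide (0 ≤ x))

theorem pv_solution_alt_eq (A : List Int) :
    solution_alt A = (PySem.List.pyRange 0 32 1).foldl
      (fun best b => if pv_qB A b && decide (best < pv_vB A b) then pv_vB A b else best) 0 := by
  unfold solution_alt
  congr 1
  funext best b
  rw [pv_innerB b.toNat A 0 false]
  simp [pv_qB, pv_vB]

def pv_andAll (s : List Int) : Int := s.foldl (fun x y => PySem.Int.band x y) (Int.not 0)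

theorem pv_solution_eq (A : List Int) :
    solution A = (pyPowerset A).foldl
      (fun acc s => if 0 < pv_andAll s then max acc (s.length : Int) else acc) 0 := rfl

-- ===== VERDICT (by name: the statement is the Claim_ definition above) =====
theorem solution_spec : Claim_equal_solution := by
  intro A hDom
  show solution A = solution_alt A
  rw [pv_solution_eq, pv_solution_alt_eq]
  obtain ⟨ha1, ha2, ha3⟩ := pv_foldmax_max (fun s => 0 < pv_andAll s)
    (fun s => (s.length : Int)) (pyPowerset A) 0
  obtain ⟨hb1, hb2, hb3⟩ := pv_foldmax_strict (pv_qB A) (pv_vB A) (PySem.List.pyRange 0 32 1) 0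
  apply le_antisymm
  · -- solution ≤ solution_alt
    rcases ha2 with h | ⟨s, hsmem, hpos, hr⟩
    · rw [h]; exact hb1
    · rw [hr]
      have hsub : s.Sublist A := (pv_mem_powerset A s).mp hsmem
      have hnn : ∃ x ∈ s, 0 ≤ x := by
        by_contra hc
        push Not at hc
        have := pv_foldl_band_neg s (Int.not 0) (by rw [pv_not_zero]; omega) hc
        simp only [pv_andAll] at hpos
        omega
      obtain ⟨x, hxs, hx0⟩ := hnn
      obtain ⟨k, hk⟩ := pv_exists_testBit _ hpos
      have hall : s.all (fun x => x.testBit k) = true := by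
        have hfb := pv_foldl_band_testBit s (Int.not 0) k
        simp only [pv_andAll] at hk
        rw [hfb] at hk
        rw [Bool.and_eq_true] at hk
        exact hk.2
      have hxk : x.testBit k = true := by
        rw [List.all_eq_true] at hall
        exact hall x hxs
      have hxA : x ∈ A := hsub.subset hxs
      have hxbound : x ≤ 2147483648 := by
        simp only [Dom_solution, List.all_eq_true] at hDom
        have := hDom x hxA
        simp [pvDomInt] at this
        omega
      have hk32 : k < 32 := pv_testBit_lt_32 x k hx0 hxbound hxk
      have hbmem : (k : Int) ∈ PySem.List.pyRange 0 32 1 := by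
        rw [PySem.List.mem_pyRange_one]
        exact ⟨Int.natCast_nonneg k, by exact_mod_cast hk32⟩
      have hq : pv_qB A (k : Int) = true := by
        simp only [pv_qB, List.any_eq_true]
        exact ⟨x, hxA, by simp [Int.toNat_natCast, hxk, hx0]⟩
      refine le_trans ?_ (hb3 _ hbmem hq)
      simp only [pv_vB, Int.toNat_natCast]
      have hfeq : s.filter (fun x => x.testBit k) = s :=
        List.filter_eq_self.mpr (by
          intro a ha
          rw [List.all_eq_true] at hall
          exact hall a ha)
      have hlen := (hsub.filter (fun x => x.testBit k)).length_le
      rw [hfeq] at hlen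
      exact_mod_cast hlen
  · -- solution_alt ≤ solution
    rcases hb2 with h | ⟨b, _, hq, hr⟩
    · rw [h]; exact ha1
    · rw [hr]
      have hsmem : A.filter (fun x => x.testBit b.toNat) ∈ pyPowerset A :=
        (pv_mem_powerset A _).mpr List.filter_sublist
      simp only [pv_qB, List.any_eq_true] at hq
      obtain ⟨x, hxA, hx⟩ := hq
      rw [Bool.and_eq_true, decide_eq_true_eq] at hx
      have hxs : x ∈ A.filter (fun x => x.testBit b.toNat) :=
        List.mem_filter.mpr ⟨hxA, hx.1⟩
      have hnneg : 0 ≤ pv_andAll (A.filter (fun x => x.testBit b.toNat)) :=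
        pv_foldl_band_nonneg_mem _ x hxs hx.2 (Int.not 0)
      have hbit : (pv_andAll (A.filter (fun x => x.testBit b.toNat))).testBit b.toNat = true := by
        simp only [pv_andAll]
        rw [pv_foldl_band_testBit, pv_not_zero, pv_neg_one_testBit, Bool.true_and,
          List.all_eq_true]
        intro a ha
        exact (List.mem_filter.mp ha).2
      have hpos : 0 < pv_andAll (A.filter (fun x => x.testBit b.toNat)) :=
        pv_testBit_pos _ _ hnneg hbit
      exact ha3 _ hsmem hpos
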